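-- pv_equiv track=rewrite | github.com/OLeksandr344/dodzavdictsets | sets/sets.py | count_strikes
-- ===== SOURCE A (Python) =====
-- def count_strikes(days, parties, strikes):
--     strike_days = set()
--     for i in range(parties):
--         a, b = map(int, strikes[i])
--         j = 0
--         while a + j * b <= days:
--             day = a + j * b
--             if (day - 1) % 7 not in [5, 6]:
--                 strike_days.add(day)
--             j += 1
--     return len(strike_days)
-- ===== SOURCE B (Python) =====
-- def count_strikes(days, parties, strikes):
--     ps = [tuple(map(int, strikes[i])) for i in range(parties)]
--     if not ps:
--         return 0
--     lo = min(p[0] for p in ps)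
--     return sum(1 for day in range(lo, days + 1)
--                if (day - 1) % 7 not in (5, 6)
--                and any(day >= a and b != 0 and (day - a) % b == 0 for a, b in ps))
-- ===== Notes on version B (the rewrite author's own statement) =====
-- stated objective: alternative
-- what changed: Replaces per-party enumeration of arithmetic-progression days into a dedup set by a single scan over the day range that counts each weekday at most once and tests membership in any progression arithmetically ((day-a) % b == 0), so no set is built; Pre_ only excludes inputs where A raises (bad index/arity) or loops forever (step <= 0 with a <= days).
import Mathlib
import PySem

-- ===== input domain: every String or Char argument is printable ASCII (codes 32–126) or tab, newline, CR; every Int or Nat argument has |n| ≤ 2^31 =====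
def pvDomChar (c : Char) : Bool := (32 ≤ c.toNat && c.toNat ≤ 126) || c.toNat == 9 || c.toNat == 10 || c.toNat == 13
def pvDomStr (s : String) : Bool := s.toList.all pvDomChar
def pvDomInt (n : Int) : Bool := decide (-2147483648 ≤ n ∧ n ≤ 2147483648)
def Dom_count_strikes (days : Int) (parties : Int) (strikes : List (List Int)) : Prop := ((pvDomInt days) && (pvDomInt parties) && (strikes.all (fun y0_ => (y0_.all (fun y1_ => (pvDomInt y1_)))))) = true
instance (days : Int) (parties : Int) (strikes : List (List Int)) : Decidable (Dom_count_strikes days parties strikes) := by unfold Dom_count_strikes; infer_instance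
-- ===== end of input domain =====

-- B replaces A's per-party AP-enumeration into a dedup set by one arithmetic scan over the day
-- range ("alternative" objective, not claimed faster).

-- ===== PORT A =====
-- '(day - 1) % 7 not in [5, 6]' (shared subexpression of both Pythons)
def pvWeekday (day : Int) : Bool := !(decide (PySem.Int.mod (day - 1) 7 ∈ ([5, 6] : List Int)))

-- the 'while a + j * b <= days' loop; fuel makes it total, Pre_ guarantees enough fuel
def pyStrikeWhile (days a b : Int) : Nat → Int → PySem.Set Int → PySem.Set Int
  | 0, _, s => s
  | fuel + 1, j, s =>
    if a + j * b ≤ days then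
      let day := a + j * b
      let s' := if pvWeekday day then PySem.Set.add s day else s
      pyStrikeWhile days a b fuel (j + 1) s'
    else s

def count_strikes (days : Int) (parties : Int) (strikes : List (List Int)) : Int :=
  let s := (PySem.List.pyRange 0 parties 1).foldl (fun s i =>
    let row := PySem.List.pyGetD strikes i []
    let a := PySem.List.pyGetD row 0 0
    let b := PySem.List.pyGetD row 1 0
    pyStrikeWhile days a b ((days - a).toNat + 2) 0 s) PySem.Set.empty
  (s.length : Int)

-- ===== PORT B =====
def count_strikes_alt (days : Int) (parties : Int) (strikes : List (List Int)) : Int :=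
  let ps := (PySem.List.pyRange 0 parties 1).map (fun i =>
    let row := PySem.List.pyGetD strikes i []
    (PySem.List.pyGetD row 0 0, PySem.List.pyGetD row 1 0))
  match ps with
  | [] => 0
  | p :: rest =>
    let lo := (rest.map (·.1)).foldl min p.1
    (((PySem.List.pyRange lo (days + 1) 1).countP (fun day =>
        pvWeekday day &&
        (p :: rest).any (fun q =>
          decide (q.1 ≤ day) && !(q.2 == 0) && decide (PySem.Int.mod (day - q.1) q.2 = 0)))) : Int)

-- ===== PRECONDITION & SPEC =====
-- Pre_ excludes exactly the inputs where Python A does not return: an index i < parties beyond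
-- strikes, a row whose arity is not 2 (unpacking raises), and a row with step b ≤ 0 whose start
-- a ≤ days (A's while loop never terminates there).
def Pre_count_strikes (days : Int) (parties : Int) (strikes : List (List Int)) : Prop :=
  parties ≤ (strikes.length : Int) ∧
  ∀ row ∈ strikes.take parties.toNat, row.length = 2 ∧ (1 ≤ row.getD 1 0 ∨ days < row.getD 0 0)
instance (days : Int) (parties : Int) (strikes : List (List Int)) : Decidable (Pre_count_strikes days parties strikes) := by unfold Pre_count_strikes; infer_instance

def pvWitness_count_strikes : Int × Int × List (List Int) := (10, 2, [[1, 2], [20, -1]])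

def Spec_count_strikes (days : Int) (parties : Int) (strikes : List (List Int)) (out : Int) : Prop := out = count_strikes_alt days parties strikes
instance (days : Int) (parties : Int) (strikes : List (List Int)) (out : Int) : Decidable (Spec_count_strikes days parties strikes out) := by unfold Spec_count_strikes; infer_instance

-- ===== CLAIM (what is proved, stated in full; the proofs are below) =====
def Claim_equal_count_strikes : Prop := ∀ (days : Int) (parties : Int) (strikes : List (List Int)), Dom_count_strikes days parties strikes → Pre_count_strikes days parties strikes → Spec_count_strikes days parties strikes (count_strikes days parties strikes)

-- ===== LEMMAS AND PROOFS =====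

-- the membership predicate B tests arithmetically, as a Prop
def pvMatch (days : Int) (p : Int × Int) (x : Int) : Prop :=
  p.1 ≤ x ∧ x ≤ days ∧ PySem.Int.mod (x - p.1) p.2 = 0

theorem pyStrikeWhile_nodup (days a b : Int) :
    ∀ (fuel : Nat) (j : Int) (s : PySem.Set Int), s.Nodup → (pyStrikeWhile days a b fuel j s).Nodup := by
  intro fuel
  induction fuel with
  | zero => intro j s hs; simpa [pyStrikeWhile] using hs
  | succ n ih =>
    intro j s hs
    simp only [pyStrikeWhile]
    split
    · apply ih
      split
      · exact PySem.Set.nodup_add _ _ hs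
      · exact hs
    · exact hs

theorem pyStrikeWhile_mem (days a b : Int) (hb : 1 ≤ b) :
    ∀ (fuel : Nat) (j : Int) (s : PySem.Set Int) (x : Int), days - (a + j * b) < (fuel : Int) →
      (x ∈ pyStrikeWhile days a b fuel j s ↔
        x ∈ s ∨ (pvWeekday x = true ∧ ∃ k : Int, j ≤ k ∧ x = a + k * b ∧ x ≤ days)) := by
  intro fuel
  induction fuel with
  | zero =>
    intro j s x h
    simp only [pyStrikeWhile]
    constructor
    · exact Or.inl
    · rintro (hx | ⟨_, k, hk, rfl, hle⟩)
      · exact hx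
      · exfalso
        have hmul : j * b ≤ k * b := mul_le_mul_of_nonneg_right hk (by omega)
        simp only [Nat.cast_zero] at h
        omega
  | succ n ih =>
    intro j s x h
    simp only [pyStrikeWhile]
    split
    · rename_i hcond
      rw [ih (j + 1) _ x (by push_cast at h ⊢; nlinarith)]
      by_cases hw : pvWeekday (a + j * b) = true
      · simp only [hw, if_pos, PySem.Set.mem_add]
        constructor
        · rintro ((hx | rfl) | ⟨hwx, k, hk, rfl, hle⟩)
          · exact Or.inl hx
          · exact Or.inr ⟨hw, j, le_refl j, rfl, hcond⟩
          · exact Or.inr ⟨hwx, k, by omega, rfl, hle⟩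
        · rintro (hx | ⟨hwx, k, hk, rfl, hle⟩)
          · exact Or.inl (Or.inl hx)
          · rcases eq_or_lt_of_le hk with rfl | hk'
            · exact Or.inl (Or.inr rfl)
            · exact Or.inr ⟨hwx, k, by omega, rfl, hle⟩
      · simp only [hw, Bool.false_eq_true, if_false]
        constructor
        · rintro (hx | ⟨hwx, k, hk, rfl, hle⟩)
          · exact Or.inl hx
          · exact Or.inr ⟨hwx, k, by omega, rfl, hle⟩
        · rintro (hx | ⟨hwx, k, hk, rfl, hle⟩)
          · exact Or.inl hx
          · rcases eq_or_lt_of_le hk with rfl | hk'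
            · exact absurd hwx hw
            · exact Or.inr ⟨hwx, k, by omega, rfl, hle⟩
    · rename_i hcond
      constructor
      · exact Or.inl
      · rintro (hx | ⟨_, k, hk, rfl, hle⟩)
        · exact hx
        · exfalso
          have hmul : j * b ≤ k * b := mul_le_mul_of_nonneg_right hk (by omega)
          omega

-- one party's whole while loop, under Pre_'s guarantee for that party
theorem pyStrikeWhile_party_mem (days a b : Int) (hp : 1 ≤ b ∨ days < a)
    (s : PySem.Set Int) (x : Int) :
    x ∈ pyStrikeWhile days a b ((days - a).toNat + 2) 0 s ↔
      x ∈ s ∨ (pvWeekday x = true ∧ pvMatch days (a, b) x) := by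
  rcases hp with hb | ha
  · rw [pyStrikeWhile_mem days a b hb _ 0 s x (by push_cast; omega)]
    unfold pvMatch
    constructor
    · rintro (hx | ⟨hw, k, hk, rfl, hle⟩)
      · exact Or.inl hx
      · refine Or.inr ⟨hw, ?_, hle, ?_⟩
        · have := mul_le_mul_of_nonneg_right hk (le_trans zero_le_one hb)
          simp only at this ⊢
          nlinarith
        · rw [PySem.Int.mod_eq_zero_iff_dvd]
          exact ⟨k, by ring⟩
    · rintro (hx | ⟨hw, hax, hxd, hmod⟩)
      · exact Or.inl hx
      · rw [PySem.Int.mod_eq_zero_iff_dvd] at hmod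
        obtain ⟨c, hc⟩ := hmod
        refine Or.inr ⟨hw, c, ?_, by simp only at hc ⊢; linarith [mul_comm b c], hxd⟩
        simp only at hax hc
        nlinarith
  · show x ∈ pyStrikeWhile days a b ((days - a).toNat + 1 + 1) 0 s ↔ _
    simp only [pyStrikeWhile]
    rw [if_neg (by omega)]
    unfold pvMatch
    constructor
    · exact Or.inl
    · rintro (hx | ⟨_, hax, hxd, _⟩)
      · exact hx
      · exact absurd hax (by simp only; omega)

theorem strike_fold_mem (days : Int) (ps : List (Int × Int))
    (hps : ∀ p ∈ ps, 1 ≤ p.2 ∨ days < p.1) (s : PySem.Set Int) (x : Int) :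
    x ∈ ps.foldl (fun s p => pyStrikeWhile days p.1 p.2 ((days - p.1).toNat + 2) 0 s) s ↔
      x ∈ s ∨ (pvWeekday x = true ∧ ∃ p ∈ ps, pvMatch days p x) := by
  induction ps generalizing s with
  | nil => simp
  | cons p t ih =>
    simp only [List.foldl_cons]
    rw [ih (fun q hq => hps q (List.mem_cons_of_mem p hq)),
        pyStrikeWhile_party_mem days p.1 p.2 (hps p List.mem_cons_self) s x]
    simp only [List.mem_cons]
    constructor
    · rintro ((hx | ⟨hw, hm⟩) | ⟨hw, q, hq, hm⟩)
      · exact Or.inl hx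
      · exact Or.inr ⟨hw, p, Or.inl rfl, hm⟩
      · exact Or.inr ⟨hw, q, Or.inr hq, hm⟩
    · rintro (hx | ⟨hw, q, (rfl | hq), hm⟩)
      · exact Or.inl (Or.inl hx)
      · exact Or.inl (Or.inr ⟨hw, hm⟩)
      · exact Or.inr ⟨hw, q, hq, hm⟩

theorem strike_fold_nodup (days : Int) (ps : List (Int × Int)) (s : PySem.Set Int) (hs : s.Nodup) :
    (ps.foldl (fun s p => pyStrikeWhile days p.1 p.2 ((days - p.1).toNat + 2) 0 s) s).Nodup := by
  induction ps generalizing s with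
  | nil => exact hs
  | cons p t ih => exact ih _ (pyStrikeWhile_nodup _ _ _ _ _ _ hs)

-- ===== VERDICT (by name: the statement is the Claim_ definition above) =====
theorem cover_of_pre (days parties : Int) (strikes : List (List Int))
    (hlen : parties ≤ (strikes.length : Int))
    (hrows : ∀ row ∈ strikes.take parties.toNat, row.length = 2 ∧ (1 ≤ row.getD 1 0 ∨ days < row.getD 0 0)) :
    ∀ p ∈ (PySem.List.pyRange 0 parties 1).map (fun i =>
      let row := PySem.List.pyGetD strikes i []
      (PySem.List.pyGetD row 0 0, PySem.List.pyGetD row 1 0)), 1 ≤ p.2 ∨ days < p.1 := by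
  intro p hp
  simp only [List.mem_map] at hp
  obtain ⟨i, hi, rfl⟩ := hp
  rw [PySem.List.mem_pyRange_one] at hi
  have hiL : i < (strikes.length : Int) := lt_of_lt_of_le hi.2 hlen
  have hrow : PySem.List.pyGetD strikes i [] = strikes[i.toNat]'(by omega) :=
    PySem.List.pyGetD_eq_getElem strikes [] hi.1 hiL
  have hmem : strikes[i.toNat]'(by omega) ∈ strikes.take parties.toNat := by
    have h1 : i.toNat < (strikes.take parties.toNat).length := by
      simp only [List.length_take]; omega
    have h2 : (strikes.take parties.toNat)[i.toNat]'h1 = strikes[i.toNat]'(by omega) :=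
      List.getElem_take
    rw [← h2]
    exact List.getElem_mem h1
  obtain ⟨hl2, hab⟩ := hrows _ hmem
  have hg0 : PySem.List.pyGetD (strikes[i.toNat]'(by omega)) (0 : Int) 0
      = (strikes[i.toNat]'(by omega)).getD 0 0 := by
    rw [PySem.List.pyGetD_eq_getElem _ _ (by omega) (by rw [hl2]; omega)]
    rw [List.getD_eq_getElem _ _ (by omega)]
    rfl
  have hg1 : PySem.List.pyGetD (strikes[i.toNat]'(by omega)) (1 : Int) 0
      = (strikes[i.toNat]'(by omega)).getD 1 0 := by
    rw [PySem.List.pyGetD_eq_getElem _ _ (by omega) (by rw [hl2]; omega)]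
    rw [List.getD_eq_getElem _ _ (by omega)]
    rfl
  simp only [hrow, hg0, hg1]
  exact hab

-- ===== VERDICT (by name: the statement is the Claim_ definition above) =====
theorem count_strikes_spec : Claim_equal_count_strikes := by
  intro days parties strikes _hdom hpre
  obtain ⟨hlen, hrows⟩ := hpre
  show count_strikes days parties strikes = count_strikes_alt days parties strikes
  simp only [count_strikes, count_strikes_alt]
  have hcov := cover_of_pre days parties strikes hlen hrows
  rw [show (PySem.List.pyRange 0 parties 1).foldl (fun s i =>
        let row := PySem.List.pyGetD strikes i []
        let a := PySem.List.pyGetD row 0 0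
        let b := PySem.List.pyGetD row 1 0
        pyStrikeWhile days a b ((days - a).toNat + 2) 0 s) PySem.Set.empty
      = ((PySem.List.pyRange 0 parties 1).map (fun i =>
          let row := PySem.List.pyGetD strikes i []
          (PySem.List.pyGetD row 0 0, PySem.List.pyGetD row 1 0))).foldl
          (fun s p => pyStrikeWhile days p.1 p.2 ((days - p.1).toNat + 2) 0 s) PySem.Set.empty
      by rw [List.foldl_map]]
  cases hps : (PySem.List.pyRange 0 parties 1).map (fun i =>
      let row := PySem.List.pyGetD strikes i []
      (PySem.List.pyGetD row 0 0, PySem.List.pyGetD row 1 0)) with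
  | nil => simp
  | cons p rest =>
    rw [hps] at hcov
    congr 1
    rw [List.countP_eq_length_filter]
    have hlo : ∀ q ∈ p :: rest, (rest.map (·.1)).foldl min p.1 ≤ q.1 := by
      intro q hq
      rcases List.mem_cons.mp hq with rfl | hq'
      · exact (PySem.List.foldl_min_le _ _).1
      · exact (PySem.List.foldl_min_le _ _).2 _ (List.mem_map_of_mem hq')
    apply List.Perm.length_eq
    rw [List.perm_ext_iff_of_nodup
        (strike_fold_nodup days (p :: rest) PySem.Set.empty List.nodup_nil)
        (List.Nodup.filter _ (PySem.List.nodup_pyRange_one _ _))]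
    intro x
    rw [strike_fold_mem days (p :: rest) hcov PySem.Set.empty x, List.mem_filter,
        PySem.List.mem_pyRange_one]
    simp only [PySem.Set.empty, List.not_mem_nil, false_or, Bool.and_eq_true, List.any_eq_true,
      decide_eq_true_eq, Bool.not_eq_eq_eq_not, Bool.not_true, beq_eq_false_iff_ne, ne_eq]
    constructor
    · rintro ⟨hw, q, hq, hm⟩
      obtain ⟨hax, hxd, hmod⟩ := hm
      refine ⟨⟨le_trans (hlo q hq) hax, by omega⟩, hw, q, hq, ⟨hax, ?_⟩, hmod⟩
      rcases hcov q hq with hb | ha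
      · omega
      · omega
    · rintro ⟨⟨hlox, hxd⟩, hw, q, hq, ⟨hax, hbne⟩, hmod⟩
      exact ⟨hw, q, hq, hax, by omega, hmod⟩
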